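-- pv_equiv track=rewrite | github.com/JacobRammer/CIS-210 | Alphapin Encoding/p41_alphapin.py | checkTone
-- ===== SOURCE A (Python) =====
-- VOWELS = "aeiou"
--
-- CONSONANTS = "bcdfghjklmnpqrstvwyz"
--
-- def findConst(tone):
--     """(str) -> str
--
--     finds the constants in a given string (tone) and returns them. Given the string is formatted correctly:
--     (constant, vowel, constant)
--
--     >>> findConst("dafi")
--     'df'
--     >>> findConst("joke")
--     'jk'
--
--     """
--     constants = tone[::2]
--     return constants
--
-- def findVowel(tone):
--     """(str) -> str
--
--     finds the vowels in a given string (tone) and returns them. Given the string is formatted correctly: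
--     (constant, vowel, constant)
--
--
--     >>> findVowel("joke")
--     'oe'
--     >>> findVowel("dafi")
--     'ai'
--
--     """
--     vowels = tone[1::2]
--
--     return vowels
--
-- def checkTone(tone):
--     """(str) -> bool
--
--     Checks to see if the tone is in the right format of (constant, vowel, constant) and returns True if string
--     is formatted correctly of false if not.
--
--     >>> checkTone("loohi")
--     False
--     >>> checkTone("lohi")
--     True
--
--     """
--     # constants = tone[::2]
--     # vowels = tone[1::2]
--
--     constants = findConst(tone)
--     vowels = findVowel(tone)
--     for c, v in zip(constants, vowels):
--         if c in CONSONANTS and v in VOWELS: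
--             pass
--         else:
--             return False
--     return True
-- ===== SOURCE B (Python) =====
-- VOWELS = "aeiou"
--
-- CONSONANTS = "bcdfghjklmnpqrstvwyz"
--
--
-- def checkTone(tone):
--     """Single index loop stepping by two: checks each consonant-vowel pair in
--     place; a lone trailing character (odd length) is not validated, as in A."""
--     i = 0
--     n = len(tone)
--     while i + 1 < n:
--         if tone[i] not in CONSONANTS or tone[i + 1] not in VOWELS:
--             return False
--         i += 2
--     return True
-- ===== Notes on version B (the rewrite author's own statement) =====
-- stated objective: simpler
-- what changed: Replaced the two-strided-slice-plus-zip loop (helpers findConst/findVowel) with a direct recursion that consumes the string two characters at a time, checking each consonant-vowel pair in place.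
import Mathlib
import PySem

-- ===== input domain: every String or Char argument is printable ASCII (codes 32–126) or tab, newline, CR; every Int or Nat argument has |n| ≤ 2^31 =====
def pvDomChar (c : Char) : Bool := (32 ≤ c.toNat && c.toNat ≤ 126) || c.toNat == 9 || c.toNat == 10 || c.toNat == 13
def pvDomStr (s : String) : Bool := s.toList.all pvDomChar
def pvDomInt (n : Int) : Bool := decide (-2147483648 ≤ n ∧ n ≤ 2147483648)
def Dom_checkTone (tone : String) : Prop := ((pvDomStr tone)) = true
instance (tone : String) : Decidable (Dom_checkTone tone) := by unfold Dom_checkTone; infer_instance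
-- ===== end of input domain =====

-- B replaces A's two strided slices + zip loop by a single index loop stepping by two; same O(n) cost, simpler shape.


-- ===== PORT A =====
def pvVOWELS : String := "aeiou"
def pvCONSONANTS : String := "bcdfghjklmnpqrstvwyz"

-- tone[::2]; step 2 ≠ 0, so slice? never returns none and .getD "" is exact
def findConst (tone : String) : String := (PySem.Str.slice? tone none none 2).getD ""

-- tone[1::2]
def findVowel (tone : String) : String := (PySem.Str.slice? tone (some 1) none 2).getD ""

-- the 'for c, v in zip(...)' loop with its early 'return False'
def checkToneLoop : List (Char × Char) → Bool
  | [] => true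
  | (c, v) :: rest =>
      if pvCONSONANTS.toList.contains c && pvVOWELS.toList.contains v then checkToneLoop rest
      else false

def checkTone (tone : String) : Bool :=
  let constants := findConst tone
  let vowels := findVowel tone
  checkToneLoop (constants.toList.zip vowels.toList)

-- ===== PORT B =====
-- the 'while i + 1 < n' loop of Source B, recursing on the index i
def checkToneAltGo (cs : List Char) (i : Nat) : Bool :=
  if h : i + 1 < cs.length then
    if !pvCONSONANTS.toList.contains cs[i] || !pvVOWELS.toList.contains cs[i + 1] then false
    else checkToneAltGo cs (i + 2)
  else true
termination_by cs.length - i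

def checkTone_alt (tone : String) : Bool := checkToneAltGo tone.toList 0

-- ===== PRECONDITION & SPEC =====
def Spec_checkTone (tone : String) (out : Bool) : Prop := out = checkTone_alt tone
instance (tone : String) (out : Bool) : Decidable (Spec_checkTone tone out) := by unfold Spec_checkTone; infer_instance

-- ===== CLAIM (what is proved, stated in full; the proofs are below) =====
def Claim_equal_checkTone : Prop := ∀ (tone : String), Dom_checkTone tone → Spec_checkTone tone (checkTone tone)

-- ===== LEMMAS AND PROOFS =====

-- elements of l at even indices (what tone[::2] computes)
def pvEvens {α : Type} : List α → List α
  | [] => []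
  | [a] => [a]
  | a :: _ :: t => a :: pvEvens t

theorem pvEvens_cons {α : Type} (v : α) (rest : List α) :
    pvEvens (v :: rest) = v :: pvEvens rest.tail := by
  cases rest <;> simp [pvEvens]

theorem pvEvens_filterMap {α : Type} (l : List α) :
    List.filterMap (fun k : Nat => l[2 * k]?) (List.range ((l.length + 1) / 2)) = pvEvens l := by
  induction l using pvEvens.induct with
  | case1 => simp [pvEvens]
  | case2 a => simp [pvEvens, List.range_succ]
  | case3 a b t ih =>
      have hc : ((a :: b :: t).length + 1) / 2 = (t.length + 1) / 2 + 1 := by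
        simp only [List.length_cons]; omega
      rw [hc, List.range_succ_eq_map]
      rw [show pvEvens (a :: b :: t) = a :: pvEvens t from rfl]
      simp only [List.filterMap_cons, Nat.mul_zero, List.getElem?_cons_zero, List.filterMap_map,
        Function.comp]
      rw [← ih]
      refine congrArg _ (List.filterMap_congr ?_)
      intro k _
      show (a :: b :: t)[2 * Nat.succ k]? = t[2 * k]?
      have h2 : 2 * Nat.succ k = 2 * k + 1 + 1 := by omega
      rw [h2, List.getElem?_cons_succ, List.getElem?_cons_succ]

theorem slice_evens {α : Type} (l : List α) :
    PySem.List.slice? l none none 2 = some (pvEvens l) := by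
  rw [PySem.List.slice?]
  simp only [PySem.List.sliceIndices]
  norm_num
  rw [← pvEvens_filterMap l]
  have hcnt : (if 0 < l.length then (((l.length:Int) + 2 - 1) / 2).toNat else 0)
      = (l.length + 1) / 2 := by
    split <;> omega
  rw [hcnt]
  refine List.filterMap_congr ?_
  intro k _
  have h0 : ((0:Int) + 2 * (k:Int)).toNat = 2 * k := by omega
  simp only [Int.zero_add] at h0 ⊢
  rw [h0]

theorem slice_odds {α : Type} (l : List α) :
    PySem.List.slice? l (some 1) none 2 = some (pvEvens l.tail) := by
  cases l with
  | nil => rfl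
  | cons a t =>
      rw [PySem.List.slice?]
      simp only [PySem.List.sliceIndices]
      norm_num
      rw [← pvEvens_filterMap t]
      have hcnt : (if 0 < t.length then (((t.length:Int) + 2 - 1) / 2).toNat else 0)
          = (t.length + 1) / 2 := by
        split <;> omega
      rw [hcnt]
      refine List.filterMap_congr ?_
      intro k _
      have h1 : ((1:Int) + 2 * (k:Int)).toNat = 2 * k + 1 := by omega
      rw [h1]
      show (a :: t)[2 * k + 1]? = t[2 * k]?
      rw [List.getElem?_cons_succ]

-- pair-consuming recursion, the common shape both sides reduce to
def pvPairOk : List Char → Bool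
  | c :: v :: rest =>
      (pvCONSONANTS.toList.contains c && pvVOWELS.toList.contains v) && pvPairOk rest
  | _ => true

theorem loop_zip_evens : ∀ (l : List Char),
    checkToneLoop ((pvEvens l).zip (pvEvens l.tail)) = pvPairOk l
  | [] => rfl
  | [_] => rfl
  | c :: v :: rest => by
      have ih := loop_zip_evens rest
      rw [show pvEvens (c :: v :: rest) = c :: pvEvens rest from rfl]
      rw [show (c :: v :: rest).tail = v :: rest from rfl, pvEvens_cons]
      show checkToneLoop ((c, v) :: (pvEvens rest).zip (pvEvens rest.tail)) = _
      rw [checkToneLoop]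
      rw [show pvPairOk (c :: v :: rest)
            = ((pvCONSONANTS.toList.contains c && pvVOWELS.toList.contains v) && pvPairOk rest)
          from rfl]
      cases hX : pvCONSONANTS.toList.contains c && pvVOWELS.toList.contains v <;> simp [ih]

theorem pairOk_short (l : List Char) (h : l.length ≤ 1) : pvPairOk l = true := by
  match l, h with
  | [], _ => rfl
  | [_], _ => rfl

theorem altGo_eq_pairOk : ∀ (n : Nat) (cs : List Char) (i : Nat), cs.length ≤ i + n →
    checkToneAltGo cs i = pvPairOk (cs.drop i)
  | 0, cs, i, hn => by
      rw [checkToneAltGo, dif_neg (by omega)]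
      rw [pairOk_short _ (by simp [List.length_drop]; omega)]
  | n + 1, cs, i, hn => by
      rw [checkToneAltGo]
      by_cases h : i + 1 < cs.length
      · rw [dif_pos h]
        have h0 : i < cs.length := by omega
        rw [List.drop_eq_getElem_cons h0, List.drop_eq_getElem_cons h]
        have ih := altGo_eq_pairOk n cs (i + 2) (by omega)
        rw [show pvPairOk (cs[i] :: cs[i + 1] :: List.drop (i + 1 + 1) cs)
              = ((pvCONSONANTS.toList.contains cs[i] && pvVOWELS.toList.contains cs[i + 1])
                  && pvPairOk (List.drop (i + 1 + 1) cs)) from rfl]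
        cases hc : pvCONSONANTS.toList.contains cs[i] <;>
          cases hv : pvVOWELS.toList.contains cs[i + 1] <;>
            simp [ih, Nat.add_assoc]
      · rw [dif_neg h]
        rw [pairOk_short _ (by simp [List.length_drop]; omega)]

-- ===== VERDICT (by name: the statement is the Claim_ definition above) =====
theorem checkTone_spec : Claim_equal_checkTone := by
  intro tone _
  show checkTone tone = checkTone_alt tone
  rw [checkTone, checkTone_alt]
  simp only [findConst, findVowel, PySem.Str.slice?, PySem.Chars.slice?,
    slice_evens, slice_odds, Option.map_some, Option.getD_some, String.toList_ofList]
  rw [loop_zip_evens]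
  rw [altGo_eq_pairOk tone.toList.length tone.toList 0 (by omega)]
  rw [List.drop_zero]
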